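-- pv_equiv track=rewrite | github.com/mrisoli/adventofcode | python/2025/d06p2.py | calc
-- ===== SOURCE A (Python) =====
-- from math import prod
--
-- def calc(col_strings):
--     # Last row contains the operator
--     *num_rows, op_row = col_strings
--     op = op_row.strip()
--
--     # Read each digit position top-to-bottom to form operands
--     # The alignment is already in the column strings
--     max_len = max(len(row) for row in num_rows)
--     operands = []
--     for pos in range(max_len):
--         digits = [row[pos] for row in num_rows if pos < len(row) and row[pos] != ' ']
--         if digits:
--             operands.append(int(''.join(digits)))
--
--     if op == '+':
--         return sum(operands)
--     return prod(operands)
-- ===== SOURCE B (Python) =====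
-- from math import prod
--
-- def calc(col_strings):
--     # Last row contains the operator
--     *num_rows, op_row = col_strings
--     op = op_row.strip()
--
--     # Single row-major pass: accumulate each column's digits into a growing string.
--     cols = [''] * max(len(row) for row in num_rows)
--     for row in num_rows:
--         for pos, ch in enumerate(row):
--             if ch != ' ':
--                 cols[pos] += ch
--
--     operands = [int(s) for s in cols if s]
--     return sum(operands) if op == '+' else prod(operands)
-- ===== Notes on version B (the rewrite author's own statement) =====
-- stated objective: alternative
-- what changed: A scans column-by-column with an index loop and a per-position bounds-checked comprehension over all rows; B makes one row-major pass that accumulates each column's digits into an array of partial strings indexed by position, converting to ints only at the end.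
-- outside the precondition, e.g. on calc(['+', '5', '+']): A returns 5, B returns 5
import Mathlib
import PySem

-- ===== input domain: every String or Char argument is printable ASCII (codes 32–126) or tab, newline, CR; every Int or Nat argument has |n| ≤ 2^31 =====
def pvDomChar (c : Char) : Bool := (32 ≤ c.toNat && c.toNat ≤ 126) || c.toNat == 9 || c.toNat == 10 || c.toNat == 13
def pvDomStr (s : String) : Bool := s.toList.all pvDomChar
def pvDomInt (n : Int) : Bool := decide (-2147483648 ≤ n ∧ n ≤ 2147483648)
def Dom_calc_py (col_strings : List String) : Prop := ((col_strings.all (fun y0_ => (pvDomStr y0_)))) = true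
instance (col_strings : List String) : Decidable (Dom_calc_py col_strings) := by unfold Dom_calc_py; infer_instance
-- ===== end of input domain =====

-- B replaces A's column-by-column index loop by one row-major pass that accumulates each
-- column's digits into an array of partial strings; same result, a different traversal.

-- ===== PORT A =====
-- Port of A: *num_rows, op_row = col_strings; for pos in range(max_len): collect digits, int-join.
def calc_py (col_strings : List String) : Int :=
  let num_rows := col_strings.dropLast                       -- *num_rows, op_row = col_strings
  let op_row := (col_strings.getLast?).getD ""               -- raises on [] in Python; excluded by Pre_
  let op := PySem.Str.strip op_row
  let max_len : Int :=
    (PySem.List.max? (num_rows.map (fun row => PySem.Str.len row)) (fun x => x)).getD 0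
                                                             -- max() raises on empty num_rows; excluded by Pre_
  let operands := (PySem.List.pyRange 0 max_len 1).foldl (fun acc pos =>
      let digits := num_rows.filterMap (fun row =>
        match PySem.Str.pyGet? row pos with                  -- pos ≥ 0 here, so: some c ↔ pos < len row
        | some c => if c ≠ ' ' then some c else none
        | none => none)
      if digits ≠ [] then
        acc ++ [(PySem.Int.ofChars? digits).getD 0]          -- int(''.join(digits)); Pre_ makes it parse
      else acc) []
  if op = "+" then operands.sum else operands.prod

-- ===== PORT B =====
-- cols[pos] += ch (pos always < len(cols) since len(cols) = max row length)
def pvColsStep (s : List (List Char)) (pc : Char × Nat) : List (List Char) :=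
  if pc.1 ≠ ' ' then s.set pc.2 (s.getD pc.2 [] ++ [pc.1]) else s

def calc_py_alt (col_strings : List String) : Int :=
  let num_rows := col_strings.dropLast                       -- *num_rows, op_row = col_strings
  let op := PySem.Str.strip ((col_strings.getLast?).getD "") -- raises on [] in Python; excluded by Pre_
  let width : Int :=
    (PySem.List.max? (num_rows.map (fun row => PySem.Str.len row)) (fun x => x)).getD 0
                                                             -- max() raises on empty num_rows; excluded by Pre_
  let cols := num_rows.foldl (fun s row =>
      (row.toList.zipIdx).foldl pvColsStep s)                -- for pos, ch in enumerate(row): (indices are 0,1,…)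
    (List.replicate width.toNat [])                          -- [''] * width
  let operands := cols.filterMap (fun s =>
      if s ≠ [] then some ((PySem.Int.ofChars? s).getD 0) else none)   -- [int(s) for s in cols if s]
  if op = "+" then operands.sum else operands.prod

-- ===== PRECONDITION & SPEC =====
-- Pre_: where Python A returns: at least one number row plus the operator row, and the number
-- rows contain only spaces and decimal digits (otherwise int() normally raises ValueError); this
-- also excludes rare columns whose sign/underscore characters happen to form a parseable int,
-- where A and B still agree.
def Pre_calc_py (col_strings : List String) : Prop :=
  2 ≤ col_strings.length ∧
  (col_strings.dropLast.all (fun row => row.toList.all (fun c => c == ' ' || c.isDigit))) = true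
instance (col_strings : List String) : Decidable (Pre_calc_py col_strings) := by
  unfold Pre_calc_py; infer_instance
def pvWitness_calc_py : List String := ["12", "34", "+"]

def Spec_calc_py (col_strings : List String) (out : Int) : Prop := out = calc_py_alt col_strings
instance (col_strings : List String) (out : Int) : Decidable (Spec_calc_py col_strings out) := by
  unfold Spec_calc_py; infer_instance

-- ===== CLAIM (what is proved, stated in full; the proofs are below) =====
def Claim_equal_calc_py : Prop := ∀ (col_strings : List String), Dom_calc_py col_strings → Pre_calc_py col_strings → Spec_calc_py col_strings (calc_py col_strings)

-- ===== LEMMAS AND PROOFS =====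

-- the digit a row contributes to column p, as a 0/1-element list
def pvDigitAt (r : List Char) (p : Nat) : List Char :=
  match r[p]? with
  | some c => if c ≠ ' ' then [c] else []
  | none => []

-- the full digit column at position p
def pvColDigits (rows : List (List Char)) (p : Nat) : List Char :=
  rows.flatMap (fun r => pvDigitAt r p)

-- A's per-position comprehension is the digit column
theorem pvFilterMap_eq_colDigits (num_rows : List String) (k : Nat) :
    (num_rows.filterMap (fun row =>
        match PySem.Str.pyGet? row ((k : Nat) : Int) with
        | some c => if c ≠ ' ' then some c else none
        | none => none))
      = pvColDigits (num_rows.map String.toList) k := by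
  induction num_rows with
  | nil => simp [pvColDigits]
  | cons row t ih =>
    simp only [List.filterMap_cons, pvColDigits, List.map_cons, List.flatMap_cons]
    simp only [pvColDigits] at ih
    cases h : PySem.Str.pyGet? row ((k : Nat) : Int) with
    | none =>
      have h' : row.toList[k]? = none := by simpa [PySem.Str.pyGet?] using h
      rw [ih]
      simp [pvDigitAt, h']
    | some c =>
      have h' : row.toList[k]? = some c := by simpa [PySem.Str.pyGet?] using h
      rw [ih]
      by_cases hc : c = ' '
      · simp [pvDigitAt, h', hc]
      · simp [pvDigitAt, h', hc]

theorem pvColsStep_length (s : List (List Char)) (pc : Char × Nat) :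
    (pvColsStep s pc).length = s.length := by
  unfold pvColsStep; split <;> simp

theorem pvFoldStep_length (l : List (Char × Nat)) (s : List (List Char)) :
    (l.foldl pvColsStep s).length = s.length := by
  induction l generalizing s with
  | nil => rfl
  | cons x t ih => rw [List.foldl_cons, ih, pvColsStep_length]

-- inner loop: one row adds its digit (if any) to each column it covers
theorem pvInner (row : List Char) (k : Nat) (s : List (List Char)) (p : Nat)
    (hk : k + row.length ≤ s.length) :
    ((row.zipIdx k).foldl pvColsStep s).getD p []
      = s.getD p [] ++ (if k ≤ p then pvDigitAt row (p - k) else []) := by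
  induction row generalizing k s with
  | nil => simp [pvDigitAt]
  | cons c r ih =>
    rw [List.zipIdx_cons, List.foldl_cons]
    have hklen : k < s.length := by simp at hk; omega
    have hlen' : (pvColsStep s (c, k)).length = s.length := pvColsStep_length s (c, k)
    have hk' : (k + 1) + r.length ≤ (pvColsStep s (c, k)).length := by
      simp only [hlen']; simp at hk ⊢; omega
    rw [ih (k + 1) _ hk']
    by_cases hpk : p = k
    · subst hpk
      have h1 : ¬ (p + 1 ≤ p) := by omega
      rw [if_neg h1, if_pos (le_refl p)]
      have hp0 : p - p = 0 := by omega
      rw [hp0]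
      unfold pvColsStep pvDigitAt
      by_cases hc : c = ' '
      · simp [hc]
      · simp only [hc, ne_eq, not_false_iff, if_true]
        rw [List.getD_eq_getElem?_getD, List.getElem?_set_self (by omega)]
        simp [List.getD_eq_getElem?_getD, hc]
    · have hs' : (pvColsStep s (c, k)).getD p [] = s.getD p [] := by
        unfold pvColsStep
        split
        · rw [List.getD_eq_getElem?_getD, List.getElem?_set_ne (by omega),
            ← List.getD_eq_getElem?_getD]
        · rfl
      rw [hs']
      by_cases hle : k ≤ p
      · have hle1 : k + 1 ≤ p := by omega
        rw [if_pos hle1, if_pos hle]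
        have : (c :: r)[p - k]? = r[p - (k + 1)]? := by
          have h2 : p - k = (p - (k + 1)) + 1 := by omega
          rw [h2]; simp
        unfold pvDigitAt
        rw [this]
      · rw [if_neg (by omega), if_neg hle]

-- outer loop: the whole pass appends each row's contribution, column by column
theorem pvOuter (rows : List (List Char)) (s : List (List Char)) (p : Nat)
    (h : ∀ r ∈ rows, r.length ≤ s.length) :
    (rows.foldl (fun s row => (row.zipIdx).foldl pvColsStep s) s).getD p []
      = s.getD p [] ++ pvColDigits rows p := by
  induction rows generalizing s with
  | nil => simp [pvColDigits]
  | cons r t ih =>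
    rw [List.foldl_cons]
    have hr : r.length ≤ s.length := h r (List.mem_cons_self)
    have hs' : ((r.zipIdx).foldl pvColsStep s).length = s.length := pvFoldStep_length _ s
    have ht : ∀ q ∈ t, q.length ≤ ((r.zipIdx).foldl pvColsStep s).length := by
      intro q hq; rw [hs']; exact h q (List.mem_cons_of_mem _ hq)
    rw [ih _ ht, pvInner r 0 s p (by omega), if_pos (Nat.zero_le p)]
    simp [pvColDigits, List.append_assoc]

-- max row length, foldr form
def pvMaxLen (rows : List (List Char)) : Nat :=
  rows.foldr (fun r m => max r.length m) 0

theorem pvLen_le_maxLen (rows : List (List Char)) (r : List Char) (hr : r ∈ rows) :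
    r.length ≤ pvMaxLen rows := by
  induction rows with
  | nil => cases hr
  | cons x t ih =>
    rcases List.mem_cons.mp hr with h | h
    · subst h; simp [pvMaxLen]
    · have := ih h
      simp only [pvMaxLen, List.foldr_cons] at this ⊢
      omega

theorem pvFoldlMaxCast (l : List Nat) (a : Nat) :
    (l.map (fun n : Nat => (n : Int))).foldl max (a : Int) = ((l.foldl max a : Nat) : Int) := by
  induction l generalizing a with
  | nil => simp
  | cons x t ih =>
    rw [List.map_cons, List.foldl_cons, List.foldl_cons, ← Nat.cast_max, ih]

theorem pvFoldlMax_eq_foldr (l : List Nat) (a : Nat) :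
    l.foldl max a = max a (l.foldr max 0) := by
  induction l generalizing a with
  | nil => simp
  | cons x t ih =>
    rw [List.foldl_cons, List.foldr_cons, ih]
    omega

-- max(len(row) for row in num_rows), totalised with 0 on [], is pvMaxLen of the rows
theorem pvMaxLen_eq (num_rows : List String) :
    (PySem.List.max? (num_rows.map (fun row => PySem.Str.len row)) (fun x => x)).getD 0
      = ((pvMaxLen (num_rows.map String.toList) : Nat) : Int) := by
  cases num_rows with
  | nil => simp [pvMaxLen, PySem.List.max?]
  | cons r t =>
    rw [List.map_cons, PySem.List.max?_id_cons, Option.getD_some]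
    have h1 : ∀ s : String, PySem.Str.len s = ((s.toList.length : Nat) : Int) := fun s => by simp
    have h2 : List.map (fun row => PySem.Str.len row) t
        = List.map (fun n : Nat => (n : Int)) (List.map (fun row => row.toList.length) t) := by
      rw [List.map_map]; exact List.map_congr_left fun s _ => h1 s
    rw [h1, h2, pvFoldlMaxCast]
    congr 1
    rw [pvFoldlMax_eq_foldr]
    simp only [pvMaxLen, List.map_cons, List.foldr_cons]
    congr 1
    rw [List.foldr_map, List.foldr_map]

-- B's cols array = the list of digit columns, in position order
theorem pvCols_eq (rows : List (List Char)) :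
    (rows.foldl (fun s row => (row.zipIdx).foldl pvColsStep s)
        (List.replicate (pvMaxLen rows) []))
      = (List.range (pvMaxLen rows)).map (fun p => pvColDigits rows p) := by
  have hlen : (rows.foldl (fun s row => (row.zipIdx).foldl pvColsStep s)
      (List.replicate (pvMaxLen rows) ([] : List Char))).length = pvMaxLen rows := by
    induction rows with
    | nil => simp
    | cons r t ih =>
      rw [List.foldl_cons]
      -- re-run the length argument over the whole fold
      have : ∀ (l : List (List Char)) (s : List (List Char)),
          (l.foldl (fun s row => (row.zipIdx).foldl pvColsStep s) s).length = s.length := by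
        intro l
        induction l with
        | nil => intro s; rfl
        | cons x xs ihx => intro s; rw [List.foldl_cons, ihx, pvFoldStep_length]
      rw [this, pvFoldStep_length]
      simp
  apply List.ext_getElem
  · rw [hlen]; simp
  · intro p h1 h2
    have hp : p < pvMaxLen rows := by simpa [hlen] using h1
    have hgd : (rows.foldl (fun s row => (row.zipIdx).foldl pvColsStep s)
        (List.replicate (pvMaxLen rows) ([] : List Char))).getD p []
        = pvColDigits rows p := by
      rw [pvOuter rows _ p (fun r hr => by simpa using pvLen_le_maxLen rows r hr)]
      simp [List.getD_eq_getElem?_getD]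
    rw [← List.getD_eq_getElem _ [] , hgd]
    simp

-- A's append-loop builds the filtered, mapped list
theorem pvFoldBuild {α : Type} (l : List α) (D : α → List Char) (acc : List Int) :
    l.foldl (fun acc x =>
        if D x ≠ [] then acc ++ [(PySem.Int.ofChars? (D x)).getD 0] else acc) acc
      = acc ++ ((l.map D).filter (fun d => d ≠ [])).map (fun d => (PySem.Int.ofChars? d).getD 0) := by
  induction l generalizing acc with
  | nil => simp
  | cons x t ih =>
    rw [List.foldl_cons, List.map_cons, List.filter_cons]
    by_cases h : D x = []
    · rw [if_neg (not_not_intro h), ih]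
      simp [h]
    · rw [if_pos h, ih]
      simp [h]

-- B's comprehension is the same filtered, mapped list
theorem pvFilterMapBuild (l : List (List Char)) :
    l.filterMap (fun s => if s ≠ [] then some ((PySem.Int.ofChars? s).getD 0) else none)
      = (l.filter (fun d => d ≠ [])).map (fun d => (PySem.Int.ofChars? d).getD 0) := by
  induction l with
  | nil => rfl
  | cons x t ih =>
    rw [List.filterMap_cons, List.filter_cons, ih]
    by_cases h : x = []
    · simp [h]
    · simp [h]

theorem pvFoldToList (l : List String) (init : List (List Char)) :
    l.foldl (fun s row => (row.toList.zipIdx).foldl pvColsStep s) init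
      = (l.map String.toList).foldl (fun s r => (r.zipIdx).foldl pvColsStep s) init := by
  rw [List.foldl_map]

theorem calc_main (cs : List String) : calc_py cs = calc_py_alt cs := by
  unfold calc_py calc_py_alt
  dsimp only
  rw [pvMaxLen_eq]
  simp only [Int.toNat_natCast]
  rw [pvFoldToList, pvCols_eq, PySem.List.pyRange_one]
  simp only [Int.sub_zero, Int.toNat_natCast]
  rw [pvFoldBuild, pvFilterMapBuild]
  simp only [List.nil_append, List.map_map]
  have hmaps :
      (List.range (pvMaxLen (List.map String.toList cs.dropLast))).map
          ((fun pos : Int =>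
              cs.dropLast.filterMap (fun row =>
                match PySem.Str.pyGet? row pos with
                | some c => if c ≠ ' ' then some c else none
                | none => none)) ∘ fun k : Nat => 0 + (k : Int))
        = (List.range (pvMaxLen (List.map String.toList cs.dropLast))).map
            (fun p => pvColDigits (List.map String.toList cs.dropLast) p) := by
    apply List.map_congr_left
    intro k _
    simp only [Function.comp_apply, zero_add]
    exact pvFilterMap_eq_colDigits cs.dropLast k
  rw [hmaps]

-- ===== VERDICT (by name: the statement is the Claim_ definition above) =====
theorem calc_py_spec : Claim_equal_calc_py := by
  intro cs _ _
  unfold Spec_calc_py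
  exact calc_main cs
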